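-- pv_equiv track=rewrite | github.com/ninjapapa/slide_smith | src/slide_smith/exemplar_compiler.py | _layout_signature
-- ===== SOURCE A (Python) =====
-- from typing import Any, Iterable
--
-- def _norm_ph_type(t: str) -> str:
--     return (t or "").strip().lower()
--
-- def _layout_signature(layout: dict[str, Any]) -> dict[str, Any]:
--     """Compute a normalized signature for deterministic layout matching."""
--
--     placeholders = layout.get("placeholders") or []
--     counts: dict[str, int] = {}
--
--     for ph in placeholders:
--         t = _norm_ph_type(str(ph.get("type", "")))
--         if not t:
--             continue
--         counts[t] = counts.get(t, 0) + 1
--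
--     # provide consistent ordering
--     return {
--         "counts": {k: counts[k] for k in sorted(counts.keys())},
--     }
-- ===== SOURCE B (Python) =====
-- def _layout_signature(layout):
--     """Compute a normalized signature for deterministic layout matching."""
--     placeholders = layout.get("placeholders") or []
--     types = []
--     for ph in placeholders:
--         t = str(ph.get("type", "")).strip().lower()
--         if t:
--             types.append(t)
--     types.sort()
--     # count runs of equal values in the sorted list
--     counts = {}
--     i = 0
--     while i < len(types):
--         j = i + 1
--         while j < len(types) and types[j] == types[i]:
--             j += 1
--         counts[types[i]] = j - i
--         i = j
--     return {"counts": counts}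
-- ===== Notes on version B (the rewrite author's own statement) =====
-- stated objective: alternative
-- what changed: Instead of accumulating counts into a dict and sorting its keys afterwards, B collects the normalized non-empty type strings into a list, sorts that list, and produces the counts by scanning runs of equal adjacent values.
import Mathlib
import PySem

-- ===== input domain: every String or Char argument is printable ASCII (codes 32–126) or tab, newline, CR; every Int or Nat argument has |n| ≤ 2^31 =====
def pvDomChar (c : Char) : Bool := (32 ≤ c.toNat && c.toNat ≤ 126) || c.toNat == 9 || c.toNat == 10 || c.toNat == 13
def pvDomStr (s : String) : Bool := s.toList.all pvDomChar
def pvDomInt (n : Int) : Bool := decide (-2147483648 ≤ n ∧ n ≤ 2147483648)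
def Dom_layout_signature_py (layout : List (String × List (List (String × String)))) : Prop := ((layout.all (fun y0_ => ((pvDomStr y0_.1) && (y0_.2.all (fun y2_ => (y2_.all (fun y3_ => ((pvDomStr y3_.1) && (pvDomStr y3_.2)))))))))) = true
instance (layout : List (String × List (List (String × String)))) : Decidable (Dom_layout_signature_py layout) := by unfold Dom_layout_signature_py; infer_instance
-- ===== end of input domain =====

-- B counts by sorting the list of normalized types and scanning runs, instead of A's
-- dict accumulation followed by sorting the keys (objective: alternative decomposition).

-- ===== PORT A =====
-- t = str(ph.get("type", "")).strip().lower()  (str() on a str is the identity)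
def pvNormType (ph : List (String × String)) : String :=
  PySem.Str.lower (PySem.Str.strip (PySem.Dict.getD (PySem.Dict.mk ph) "type" ""))

def layout_signature_py (layout : List (String × List (List (String × String)))) : List (String × List (String × Int)) :=
  -- layout.get("placeholders") or []  ('or []' only turns a falsy (= empty) list into [], so getD [] is exact)
  let placeholders := PySem.Dict.getD (PySem.Dict.mk layout) "placeholders" []
  let counts : PySem.Dict String Int :=
    placeholders.foldl (fun d ph =>
      let t := pvNormType ph
      if t = "" then d else d.insert t (d.getD t 0 + 1)) PySem.Dict.empty
  -- {k: counts[k] for k in sorted(counts.keys())}; counts[k] with k ∈ counts.keys, so getD is exact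
  [("counts", (PySem.List.sorted counts.keys (fun k => k) false).map (fun k => (k, counts.getD k 0)))]

-- ===== PORT B =====
-- the run-scanning while loop of Source B: head of the run, its length, recurse past the run
def pvRunCounts : List String → List (String × Int)
  | [] => []
  | x :: ys =>
      (x, ((ys.takeWhile (fun y => y == x)).length : Int) + 1) ::
        pvRunCounts (ys.dropWhile (fun y => y == x))
termination_by l => l.length
decreasing_by
  simpa using Nat.lt_succ_of_le (List.length_dropWhile_le (fun y => y == x) ys)

def layout_signature_py_alt (layout : List (String × List (List (String × String)))) : List (String × List (String × Int)) :=
  let placeholders := PySem.Dict.getD (PySem.Dict.mk layout) "placeholders" []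
  let types := placeholders.foldl (fun acc ph =>
      let t := pvNormType ph
      if t = "" then acc else acc ++ [t]) []
  [("counts", pvRunCounts (PySem.List.sorted types (fun k => k) false))]

-- ===== PRECONDITION & SPEC =====
def Spec_layout_signature_py (layout : List (String × List (List (String × String)))) (out : List (String × List (String × Int))) : Prop := out = layout_signature_py_alt layout
instance (layout : List (String × List (List (String × String)))) (out : List (String × List (String × Int))) : Decidable (Spec_layout_signature_py layout out) := by unfold Spec_layout_signature_py; infer_instance

-- ===== CLAIM (what is proved, stated in full; the proofs are below) =====
def Claim_equal_layout_signature_py : Prop := ∀ (layout : List (String × List (List (String × String)))), Dom_layout_signature_py layout → Spec_layout_signature_py layout (layout_signature_py layout)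

-- ===== LEMMAS AND PROOFS =====

-- the normalized non-empty types of the placeholder list, as a plain list
def pvTys (phs : List (List (String × String))) : List String :=
  (phs.map pvNormType).filter (fun t => !(t == ""))

theorem pvFoldA (phs : List (List (String × String))) (d : PySem.Dict String Int) :
    phs.foldl (fun d ph =>
      let t := pvNormType ph
      if t = "" then d else d.insert t (d.getD t 0 + 1)) d
      = (pvTys phs).foldl (fun d t => d.insert t (d.getD t 0 + 1)) d := by
  induction phs generalizing d with
  | nil => rfl
  | cons ph phs ih =>
      simp only [List.foldl, pvTys, List.map, List.filter]
      by_cases h : pvNormType ph = ""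
      · simp [h, ih, pvTys]
      · have h' : (pvNormType ph == "") = false := by simpa using h
        simp [h, h', ih, pvTys]

theorem pvFoldB (phs : List (List (String × String))) (acc : List String) :
    phs.foldl (fun acc ph =>
      let t := pvNormType ph
      if t = "" then acc else acc ++ [t]) acc = acc ++ pvTys phs := by
  induction phs generalizing acc with
  | nil => simp [pvTys]
  | cons ph phs ih =>
      simp only [List.foldl, pvTys, List.map, List.filter]
      by_cases h : pvNormType ph = ""
      · simp [h, ih, pvTys]
      · have h' : (pvNormType ph == "") = false := by simpa using h
        simp [h, h', ih, pvTys]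

-- x does not occur past its run in a ≤-sorted list
theorem pvNotMemDrop (x : String) (ys : List String) (hx : ∀ y ∈ ys, x ≤ y)
    (hp : ys.Pairwise (· ≤ ·)) : x ∉ ys.dropWhile (fun y => y == x) := by
  intro hmem
  have hsub : (ys.dropWhile (fun y => y == x)).Sublist ys := List.dropWhile_sublist _
  have hpd : (ys.dropWhile (fun y => y == x)).Pairwise (· ≤ ·) := hp.sublist hsub
  have hhead := List.head?_dropWhile_not (fun y => y == x) ys
  cases hdr : ys.dropWhile (fun y => y == x) with
  | nil => rw [hdr] at hmem; exact absurd hmem (List.not_mem_nil)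
  | cons z rest =>
      rw [hdr] at hmem hpd hhead
      simp only [List.head?_cons] at hhead
      have hzx : z ≠ x := by simpa using hhead
      have hzys : z ∈ ys := hsub.subset (by rw [hdr]; exact List.mem_cons_self)
      rcases List.mem_cons.mp hmem with h | h
      · exact hzx h.symm
      · exact hzx (le_antisymm ((List.pairwise_cons.mp hpd).1 x h) (hx z hzys))

-- one combined induction: keys strictly increasing, keys = members, pairs = (key, count)
theorem pvRun_main (s : List String) (hs : s.Pairwise (· ≤ ·)) :
    ((pvRunCounts s).map Prod.fst).Pairwise (· < ·)
    ∧ (∀ k, k ∈ (pvRunCounts s).map Prod.fst ↔ k ∈ s)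
    ∧ pvRunCounts s
        = ((pvRunCounts s).map Prod.fst).map (fun k => (k, (s.count k : Int))) := by
  induction s using pvRunCounts.induct with
  | case1 => simp [pvRunCounts]
  | case2 x ys ih =>
      have hx : ∀ y ∈ ys, x ≤ y := (List.pairwise_cons.mp hs).1
      have hpys : ys.Pairwise (· ≤ ·) := (List.pairwise_cons.mp hs).2
      set tk := ys.takeWhile (fun y => y == x) with htk
      set dr := ys.dropWhile (fun y => y == x) with hdr
      have hsplit : tk ++ dr = ys := List.takeWhile_append_dropWhile
      have htkx : ∀ y ∈ tk, y = x := fun y hy => by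
        simpa using List.mem_takeWhile_imp hy
      have hdrsub : dr.Sublist ys := List.dropWhile_sublist _
      have hxdr : x ∉ dr := pvNotMemDrop x ys hx hpys
      obtain ⟨ihlt, ihmem, iheq⟩ := ih (hpys.sublist hdrsub)
      have hmemdr : ∀ y ∈ dr, x < y := fun y hy =>
        lt_of_le_of_ne (hx y (hdrsub.subset hy)) (fun h => hxdr (h ▸ hy))
      have hcount_x : (x :: ys).count x = tk.length + 1 := by
        rw [List.count_cons_self, ← hsplit, List.count_append]
        have h1 : tk.count x = tk.length := by
          rw [List.count_eq_length]; intro y hy; exact ((htkx y hy) ▸ rfl)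
        have h2 : dr.count x = 0 := List.count_eq_zero.mpr hxdr
        omega
      have hcount_ne : ∀ k, k ≠ x → (x :: ys).count k = dr.count k := by
        intro k hk
        have h1 : tk.count k = 0 := List.count_eq_zero.mpr
          (fun hkm => hk (htkx k hkm))
        rw [← hsplit]
        simp [List.count_append, Ne.symm hk, h1]
      rw [pvRunCounts, ← htk, ← hdr]
      refine ⟨?_, ?_, ?_⟩
      · simp only [List.map_cons, List.pairwise_cons]
        exact ⟨fun k hk => hmemdr k ((ihmem k).mp hk), ihlt⟩
      · intro k
        simp only [List.map_cons, List.mem_cons, ihmem k]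
        constructor
        · rintro (rfl | h)
          · exact .inl rfl
          · exact .inr (hdrsub.subset h)
        · rintro (rfl | h)
          · exact .inl rfl
          · rw [← hsplit] at h
            rcases List.mem_append.mp h with h | h
            · exact .inl (htkx k h)
            · exact .inr h
      · simp only [List.map_cons, List.cons.injEq]
        constructor
        · refine Prod.ext rfl ?_
          rw [hcount_x]; push_cast; ring
        · have hcongr : ((pvRunCounts dr).map Prod.fst).map
                (fun k => (k, (((x :: ys).count k : Nat) : Int)))
              = ((pvRunCounts dr).map Prod.fst).map
                (fun k => (k, ((dr.count k : Nat) : Int))) := by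
            apply List.map_congr_left
            intro k hk
            have hkdr : k ∈ dr := (ihmem k).mp hk
            have hkx : k ≠ x := fun h => hxdr (h ▸ hkdr)
            rw [hcount_ne k hkx]
          rw [hcongr, ← iheq]

-- main lemma: the run scan of a sorted list is "sorted distinct keys paired with counts"
theorem pvRunCounts_sorted (l : List String) :
    pvRunCounts (PySem.List.sorted l (fun k => k) false)
      = (PySem.List.sorted (PySem.Set.ofList l) (fun k => k) false).map
          (fun k => (k, (l.count k : Int))) := by
  set s := PySem.List.sorted l (fun k => k) false with hsdef
  have hperm : s.Perm l := PySem.List.sorted_perm l (fun k => k) false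
  have hpw : s.Pairwise (· ≤ ·) := by
    simpa using PySem.List.sorted_pairwise l (fun k => k)
  obtain ⟨hlt, hmem, heq⟩ := pvRun_main s hpw
  set keys := (pvRunCounts s).map Prod.fst with hkeys
  have hnodup : keys.Nodup := hlt.nodup
  have hpermkeys : keys.Perm (PySem.Set.ofList l) := by
    rw [List.perm_ext_iff_of_nodup hnodup (PySem.Set.nodup_ofList l)]
    intro k
    rw [PySem.Set.mem_ofList, hmem k, hperm.mem_iff]
  have hsorted : PySem.List.sorted (PySem.Set.ofList l) (fun k => k) = keys :=
    PySem.List.sorted_eq_of_perm_of_pairwise_lt _ _ _ hpermkeys hlt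
  rw [heq, hsorted]
  apply List.map_congr_left
  intro k _
  rw [hperm.count_eq]

-- ===== VERDICT (by name: the statement is the Claim_ definition above) =====
theorem layout_signature_py_spec : Claim_equal_layout_signature_py := by
  intro layout _
  unfold Spec_layout_signature_py layout_signature_py layout_signature_py_alt
  simp only [pvFoldA, pvFoldB, List.nil_append,
    PySem.Dict.foldl_insert_getD_add_one_eq_counter,
    PySem.Dict.keys_counter, PySem.Dict.getD_counter]
  rw [pvRunCounts_sorted]
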